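-- pv_equiv track=rewrite | github.com/IuriiD/PythonBasics | codewars.com/towerbuilder.py | tower_builder
-- ===== SOURCE A (Python) =====
-- def tower_builder(n_floors):
-- 	stars = []
-- 	for n in range(1,n_floors+1):
-- 		if n == 1:
-- 			x = 1
-- 			stars.append('*')
-- 		else:
-- 			x+=2
-- 			stars.append('*'*x)
--
-- 	if n_floors==1:
-- 		return ['*',]
-- 	else:
-- 		result = []
-- 		spaces = ''
-- 		for y in range(n_floors):
-- 			spaces = (x-len(stars[y]))//2*' '
-- 			result.append(spaces+stars[y]+spaces)
-- 		return(result)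
-- ===== SOURCE B (Python) =====
-- def tower_builder(n_floors):
--     return [' ' * (n_floors - i) + '*' * (2 * i - 1) + ' ' * (n_floors - i)
--             for i in range(1, n_floors + 1)]
-- ===== Notes on version B (the rewrite author's own statement) =====
-- stated objective: simpler
-- what changed: Each floor is computed in closed form from its index (n_floors-i spaces, 2*i-1 stars) in a single pass, replacing A's incremental star accumulator plus a second padding pass over the stored list.
import Mathlib
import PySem

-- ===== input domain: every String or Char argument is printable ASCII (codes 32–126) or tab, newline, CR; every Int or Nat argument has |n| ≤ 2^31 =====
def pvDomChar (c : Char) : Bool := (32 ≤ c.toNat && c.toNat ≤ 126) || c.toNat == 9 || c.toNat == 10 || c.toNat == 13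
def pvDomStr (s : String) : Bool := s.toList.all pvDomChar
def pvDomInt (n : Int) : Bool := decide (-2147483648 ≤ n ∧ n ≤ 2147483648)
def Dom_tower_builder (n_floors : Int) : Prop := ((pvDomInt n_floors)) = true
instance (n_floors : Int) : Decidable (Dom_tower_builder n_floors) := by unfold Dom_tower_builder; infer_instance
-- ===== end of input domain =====

-- B computes each floor in closed form from its index in a single pass (simpler decomposition);
-- A builds the star strings with an incremental accumulator and then pads them in a second pass.

-- Python string repetition c * n (empty for n ≤ 0); shared string primitive of both ports.
def pvRep (c : Char) (n : Int) : String := String.ofList (PySem.List.pyRepeat [c] n)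

-- ===== PORT A =====
def tower_builder (n_floors : Int) : List String :=
  let st := (PySem.List.pyRange 1 (n_floors + 1) 1).foldl
      (fun (st : Int × List String) n =>
        if n == 1 then (1, st.2 ++ ["*"])
        else (st.1 + 2, st.2 ++ [pvRep '*' (st.1 + 2)]))
      (0, [])
  if n_floors == 1 then ["*"]
  else
    (PySem.List.pyRange 0 n_floors 1).foldl
      (fun result y =>
        let s := PySem.List.pyGetD st.2 y ""
        let spaces := pvRep ' ' (PySem.Int.floordiv (st.1 - PySem.Str.len s) 2)
        result ++ [spaces ++ s ++ spaces])
      []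

-- ===== PORT B =====
def tower_builder_alt (n_floors : Int) : List String :=
  (PySem.List.pyRange 1 (n_floors + 1) 1).map (fun i =>
    pvRep ' ' (n_floors - i) ++ pvRep '*' (2 * i - 1) ++ pvRep ' ' (n_floors - i))

-- ===== PRECONDITION & SPEC =====
def Spec_tower_builder (n_floors : Int) (out : List String) : Prop := out = tower_builder_alt n_floors
instance (n_floors : Int) (out : List String) : Decidable (Spec_tower_builder n_floors out) := by unfold Spec_tower_builder; infer_instance

-- ===== CLAIM (what is proved, stated in full; the proofs are below) =====
def Claim_equal_tower_builder : Prop := ∀ (n_floors : Int), Dom_tower_builder n_floors → Spec_tower_builder n_floors (tower_builder n_floors)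

-- ===== LEMMAS AND PROOFS =====

-- A's first loop: after m ≥ 1 iterations x = 2m-1 and stars[k] = '*' * (2k+1)
theorem pv_first_fold (m : Nat) (hm : 1 ≤ m) :
    (PySem.List.pyRange 1 ((m : Int) + 1) 1).foldl
      (fun (st : Int × List String) n =>
        if n == 1 then (1, st.2 ++ ["*"])
        else (st.1 + 2, st.2 ++ [pvRep '*' (st.1 + 2)]))
      (0, []) =
    (2 * (m : Int) - 1,
      (PySem.List.pyRange 0 (m : Int) 1).map (fun i => pvRep '*' (2 * i + 1))) := by
  induction m with
  | zero => omega
  | succ m ih =>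
    rcases Nat.eq_or_lt_of_le hm with h1 | h1
    · subst_eqs; decide
    · have hm1 : 1 ≤ m := by omega
      have e1 : ((m + 1 : Nat) : Int) + 1 = ((m : Int) + 1) + 1 := by push_cast; ring
      rw [e1, PySem.List.pyRange_one_succ_right (by omega), List.foldl_append, ih hm1]
      have h2 : ((m : Int) + 1 == 1) = false := by simp; omega
      simp only [List.foldl, h2]
      rw [show ((m + 1 : Nat) : Int) = (m : Int) + 1 by push_cast; ring,
        PySem.List.pyRange_one_succ_right (by omega : (0:Int) ≤ m)]
      simp only [List.map_append, List.map, Bool.false_eq_true, if_false]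
      refine Prod.ext (by dsimp; ring) ?_
      dsimp
      congr 3
      ring

theorem pv_len_rep (c : Char) (k : Int) (hk : 0 ≤ k) : (PySem.Str.len (pvRep c k) : Int) = k := by
  simp [pvRep, PySem.List.pyRepeat_singleton, PySem.Str.len_eq]
  omega

-- the two ports agree on every n ≥ 2 (n = 1 and n ≤ 0 are handled separately in the verdict)
theorem pv_main (m : Nat) (hm : 2 ≤ m) :
    tower_builder (m : Int) = tower_builder_alt (m : Int) := by
  have hne : ((m : Int) == 1) = false := by simp; omega
  simp only [tower_builder, tower_builder_alt, pv_first_fold m (by omega), hne,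
    Bool.false_eq_true, if_false,
    PySem.List.foldl_append_singleton_eq_map, List.nil_append]
  have step1 : ∀ y ∈ PySem.List.pyRange 0 (m:Int) 1,
      (pvRep ' ' (PySem.Int.floordiv (2 * (m:Int) - 1 -
          PySem.Str.len (PySem.List.pyGetD ((PySem.List.pyRange 0 (m:Int) 1).map (fun i => pvRep '*' (2 * i + 1))) y "")) 2) ++
        PySem.List.pyGetD ((PySem.List.pyRange 0 (m:Int) 1).map (fun i => pvRep '*' (2 * i + 1))) y "" ++
        pvRep ' ' (PySem.Int.floordiv (2 * (m:Int) - 1 -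
          PySem.Str.len (PySem.List.pyGetD ((PySem.List.pyRange 0 (m:Int) 1).map (fun i => pvRep '*' (2 * i + 1))) y "")) 2)) =
      pvRep ' ' ((m:Int) - 1 - y) ++ pvRep '*' (2 * y + 1) ++ pvRep ' ' ((m:Int) - 1 - y) := by
    intro y hy
    rw [PySem.List.mem_pyRange_one] at hy
    rw [PySem.List.pyGetD_map_pyRange_of_nonneg _ _ _ _ hy.1 hy.2,
      pv_len_rep '*' (2 * y + 1) (by omega)]
    have e : 2 * (m:Int) - 1 - (2 * y + 1) = ((m:Int) - 1 - y) * 2 := by ring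
    rw [e, PySem.Int.floordiv_eq_ediv_of_pos (by omega), Int.mul_ediv_cancel _ (by omega)]
  rw [List.map_congr_left step1]
  rw [PySem.List.pyRange_one 0 (m:Int), PySem.List.pyRange_one 1 ((m:Int)+1), List.map_map, List.map_map]
  simp only [Int.add_sub_cancel, Int.sub_zero, Int.toNat_natCast]
  apply List.map_congr_left
  intro k hk
  simp only [Function.comp]
  have e1 : (m:Int) - 1 - (0 + (k:Int)) = (m:Int) - (1 + (k:Int)) := by ring
  have e2 : 2 * (0 + (k:Int)) + 1 = 2 * (1 + (k:Int)) - 1 := by ring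
  rw [e1, e2]

-- ===== VERDICT (by name: the statement is the Claim_ definition above) =====
theorem tower_builder_spec : Claim_equal_tower_builder := by
  intro n _
  show tower_builder n = tower_builder_alt n
  rcases lt_trichotomy n 1 with h | h | h
  · have h1 : (n == 1) = false := by simp; omega
    have e1 : PySem.List.pyRange 1 (n+1) 1 = [] := PySem.List.pyRange_one_eq_nil (by omega)
    have e2 : PySem.List.pyRange 0 n 1 = [] := PySem.List.pyRange_one_eq_nil (by omega)
    simp [tower_builder, tower_builder_alt, e1, e2, h1]
  · subst h; decide
  · have e : n = (n.toNat : Int) := by omega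
    rw [e]; exact pv_main n.toNat (by omega)
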